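-- pv_equiv track=rewrite | github.com/SABS-R3-AUTOMATED-DATABASE/auto-db-pipeline | SAbDab-master/build/lib/ABDB/AB_Utils/calculations.py | cdr_numbering_iterator
-- ===== SOURCE A (Python) =====
-- def cdr_numbering_iterator(length=0, insertion_scheme="anchor"):
--     """
--
--     If we use the anchor insertion scheme (gap out from the middle
--     For the Chothia scheme it looks like
--     Len    94  95  96  97  98  99 100   -   -   -   -   -   -   -   -   -   -   - 101 102
--     1       0   #   #   #   #   #   #   #   #   #   #   #   #   #   #   #   #   #   #   #
--     2       0   #   #   #   #   #   #   #   #   #   #   #   #   #   #   #   #   #   #  -1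
--     3       0   1   #   #   #   #   #   #   #   #   #   #   #   #   #   #   #   #   #  -1
--     4       0   1   #   #   #   #   #   #   #   #   #   #   #   #   #   #   #   #  -2  -1
--     5       0   1   2   #   #   #   #   #   #   #   #   #   #   #   #   #   #   #  -2  -1
--     6       0   1   2   #   #   #   #   #   #   #   #   #   #   #   #   #   #  -3  -2  -1
--     7       0   1   2   3   #   #   #   #   #   #   #   #   #   #   #   #   #  -3  -2  -1
--     8       0   1   2   3   #   #   #   #   #   #   #   #   #   #   #   #  -4  -3  -2  -1
--     9       0   1   2   3   4   #   #   #   #   #   #   #   #   #   #   #  -4  -3  -2  -1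
--     10      0   1   2   3   4   #   #   #   #   #   #   #   #   #   #  -5  -4  -3  -2  -1
--     11      0   1   2   3   4   5   #   #   #   #   #   #   #   #   #  -5  -4  -3  -2  -1
--     12      0   1   2   3   4   5   #   #   #   #   #   #   #   #  -6  -5  -4  -3  -2  -1
--     13      0   1   2   3   4   5   6   #   #   #   #   #   #   #  -6  -5  -4  -3  -2  -1
--     14      0   1   2   3   4   5   6   #   #   #   #   #   #  -7  -6  -5  -4  -3  -2  -1
--     15      0   1   2   3   4   5   6   7   #   #   #   #   #  -7  -6  -5  -4  -3  -2  -1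
--     16      0   1   2   3   4   5   6   7   #   #   #   #  -8  -7  -6  -5  -4  -3  -2  -1
--     17      0   1   2   3   4   5   6   7   8   #   #   #  -8  -7  -6  -5  -4  -3  -2  -1
--     18      0   1   2   3   4   5   6   7   8   #   #  -9  -8  -7  -6  -5  -4  -3  -2  -1
--     19      0   1   2   3   4   5   6   7   8   9   #  -9  -8  -7  -6  -5  -4  -3  -2  -1
--     20      0   1   2   3   4   5   6   7   8   9  -10  -9  -8  -7  -6  -5  -4  -3  -2  -1
--
--
--     Iterator to give the indices of a loop of a certain length.
--
--     For the Chothia scheme it looks like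
--     Len    94  95  96  97  98  99 100   -   -   -   -   -   -   -   -   -   -   - 101 102
--     0       #   #   #   #   #   #   #   #   #   #   #   #   #   #   #   #   #   #   #   #
--     1       #   #   #   #   #   #   #   #   #   #   #   #   #   #   #   #   #   #   #  -1
--     2       #   #   #   #   #   #   #   #   #   #   #   #   #   #   #   #   #   #  -2  -1
--     3       0   #   #   #   #   #   #   #   #   #   #   #   #   #   #   #   #   #  -2  -1
--     4       0   1   #   #   #   #   #   #   #   #   #   #   #   #   #   #   #   #  -2  -1
--     5       0   1   2   #   #   #   #   #   #   #   #   #   #   #   #   #   #   #  -2  -1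
--     6       0   1   2   3   #   #   #   #   #   #   #   #   #   #   #   #   #   #  -2  -1
--     7       0   1   2   3   4   #   #   #   #   #   #   #   #   #   #   #   #   #  -2  -1
--     8       0   1   2   3   4   5   #   #   #   #   #   #   #   #   #   #   #   #  -2  -1
--     9       0   1   2   3   4   5   6   #   #   #   #   #   #   #   #   #   #   #  -2  -1
--     10      0   1   2   3   4   5   6   7   #   #   #   #   #   #   #   #   #   #  -2  -1
--     11      0   1   2   3   4   5   6   7   #   #   #   #   #   #   #   #   #  -3  -2  -1
--     12      0   1   2   3   4   5   6   7   8   #   #   #   #   #   #   #   #  -3  -2  -1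
--     13      0   1   2   3   4   5   6   7   8   #   #   #   #   #   #   #  -4  -3  -2  -1
--     14      0   1   2   3   4   5   6   7   8   9   #   #   #   #   #   #  -4  -3  -2  -1
--     15      0   1   2   3   4   5   6   7   8   9   #   #   #   #   #  -5  -4  -3  -2  -1
--     16      0   1   2   3   4   5   6   7   8   9  10   #   #   #   #  -5  -4  -3  -2  -1
--     17      0   1   2   3   4   5   6   7   8   9  10   #   #   #  -6  -5  -4  -3  -2  -1
--     18      0   1   2   3   4   5   6   7   8   9  10  11   #   #  -6  -5  -4  -3  -2  -1
--     19      0   1   2   3   4   5   6   7   8   9  10  11   #  -7  -6  -5  -4  -3  -2  -1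
--     20      0   1   2   3   4   5   6   7   8   9  10  11  12  -7  -6  -5  -4  -3  -2  -1
--     """
--     assert insertion_scheme in ["anchor", "chothia"]
--     i = 0
--     back = []
--     if insertion_scheme == "anchor":
--         i = 0
--         for _ in range(length):
--             if i >= 0:
--                 yield i
--                 i = (i+1)*-1
--             else:
--                 back.append(i)
--                 i = i*-1
--         for _ in range(len(back)-1,-1,-1):
--             yield back[_]
--
--     elif insertion_scheme == "chothia":
--         i = 0
--         to=max(0, length-2)
--         for _ in range(7)[:to]:
--             yield _
--         back = []
--         for _ in range(length-9):
--             if i >= 0: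
--                 yield i+7
--                 i = (i+1)*-1
--             else:
--                 back.append(i-2)
--                 i = i*-1
--         for _ in range(len(back)-1,-1,-1):
--             yield back[_]
--         for _ in [-1,-2][:length][::-1]:
--             yield _
-- ===== SOURCE B (Python) =====
-- def cdr_numbering_iterator(length=0, insertion_scheme="anchor"):
--     # Direct closed-form ranges instead of the sign-flipping accumulator loop.
--     assert insertion_scheme in ["anchor", "chothia"]
--     if insertion_scheme == "anchor":
--         yield from range((length + 1) // 2)
--         yield from range(-(length // 2), 0)
--     else:
--         yield from range(min(7, max(0, length - 2)))
--         m = max(0, length - 9)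
--         yield from range(7, 7 + (m + 1) // 2)
--         yield from range(-(m // 2 + 2), -2)
--         if length >= 2:
--             yield -2
--         if length >= 1:
--             yield -1
-- ===== Notes on version B (the rewrite author's own statement) =====
-- stated objective: simpler
-- what changed: Replaces the sign-flipping accumulator loop with its reversal buffer (and the slice-based head/tail) by direct yields of closed-form ranges.
-- intended difference: For length = -1 with the chothia scheme, A's tail slice [-1,-2][:length] accidentally yields [-1]; B yields nothing, the intended output for a nonpositive loop length (A itself yields nothing for length 0 and length <= -2). — e.g. on cdr_numbering_iterator(-1, "chothia"): A returns [-1], B returns []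
import Mathlib
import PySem

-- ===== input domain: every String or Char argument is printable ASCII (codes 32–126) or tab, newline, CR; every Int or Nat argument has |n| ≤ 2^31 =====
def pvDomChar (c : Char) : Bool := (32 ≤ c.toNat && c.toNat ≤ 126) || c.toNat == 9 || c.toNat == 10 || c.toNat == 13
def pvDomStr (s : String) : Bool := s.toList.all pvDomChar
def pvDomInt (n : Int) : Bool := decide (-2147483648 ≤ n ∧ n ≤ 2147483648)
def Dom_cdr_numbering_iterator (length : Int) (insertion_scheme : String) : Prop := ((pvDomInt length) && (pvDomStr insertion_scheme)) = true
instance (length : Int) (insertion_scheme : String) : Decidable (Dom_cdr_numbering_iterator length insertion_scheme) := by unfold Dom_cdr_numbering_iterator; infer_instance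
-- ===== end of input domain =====

-- B replaces A's sign-flipping accumulator loop (with reversal buffer and slice head/tail)
-- by direct closed-form ranges; objective: simpler.

-- ===== PORT A =====
-- Port of A's generator as the list of yielded values.
-- The `range(len(back)-1,-1,-1): yield back[_]` loops use pyGetD with default 0:
-- the index is always in range, so Python's back[_] never raises there.
def cdr_numbering_iterator (length : Int) (insertion_scheme : String) : List Int :=
  if insertion_scheme = "anchor" ∨ insertion_scheme = "chothia" then  -- assert
    if insertion_scheme = "anchor" then
      let s := (PySem.List.pyRange 0 length).foldl
        (fun (st : Int × List Int × List Int) _ =>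
          if st.1 ≥ 0 then (-(st.1 + 1), st.2.1 ++ [st.1], st.2.2)
          else (-st.1, st.2.1, st.2.2 ++ [st.1])) (0, [], [])
      s.2.1 ++ (PySem.List.pyRange ((s.2.2.length : Int) - 1) (-1) (-1)).foldl
        (fun acc j => acc ++ [PySem.List.pyGetD s.2.2 j 0]) []
    else  -- chothia
      let to_ := max 0 (length - 2)
      let head := PySem.List.slice (PySem.List.pyRange 0 7) none (some to_)
      let s := (PySem.List.pyRange 0 (length - 9)).foldl
        (fun (st : Int × List Int × List Int) _ =>
          if st.1 ≥ 0 then (-(st.1 + 1), st.2.1 ++ [st.1 + 7], st.2.2)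
          else (-st.1, st.2.1, st.2.2 ++ [st.1 - 2])) (0, [], [])
      head ++ s.2.1 ++
        (PySem.List.pyRange ((s.2.2.length : Int) - 1) (-1) (-1)).foldl
          (fun acc j => acc ++ [PySem.List.pyGetD s.2.2 j 0]) [] ++
        -- [-1,-2][:length][::-1]; step -1 never makes slice? none
        ((PySem.List.slice? (PySem.List.slice ([-1, -2] : List Int) none (some length))
            none none (-1)).getD [])
  else []  -- AssertionError: excluded by Pre_

-- ===== PORT B =====
def cdr_numbering_iterator_alt (length : Int) (insertion_scheme : String) : List Int :=
  if insertion_scheme = "anchor" ∨ insertion_scheme = "chothia" then  -- assert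
    if insertion_scheme = "anchor" then
      PySem.List.pyRange 0 (PySem.Int.floordiv (length + 1) 2) ++
      PySem.List.pyRange (-(PySem.Int.floordiv length 2)) 0
    else
      let m := max 0 (length - 9)
      PySem.List.pyRange 0 (min 7 (max 0 (length - 2))) ++
      PySem.List.pyRange 7 (7 + PySem.Int.floordiv (m + 1) 2) ++
      PySem.List.pyRange (-(PySem.Int.floordiv m 2 + 2)) (-2) ++
      (if length ≥ 2 then [-2] else []) ++
      (if length ≥ 1 then [-1] else [])
  else []  -- AssertionError: excluded by Pre_

-- ===== PRECONDITION & SPEC =====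
-- A's assert raises AssertionError for any other insertion_scheme.
def Pre_cdr_numbering_iterator (length : Int) (insertion_scheme : String) : Prop :=
  insertion_scheme = "anchor" ∨ insertion_scheme = "chothia"
instance (length : Int) (insertion_scheme : String) : Decidable (Pre_cdr_numbering_iterator length insertion_scheme) := by unfold Pre_cdr_numbering_iterator; infer_instance
def pvWitness_cdr_numbering_iterator : Int × String := (5, "anchor")

-- For length = -1 with the chothia scheme, A's tail slice [-1,-2][:length] accidentally
-- yields [-1]; B yields nothing, the intended output for a nonpositive loop length
-- (A itself yields nothing for length 0 and length ≤ -2).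
def D_cdr_numbering_iterator (length : Int) (insertion_scheme : String) : Prop :=
  length = -1 ∧ insertion_scheme = "chothia"
instance (length : Int) (insertion_scheme : String) : Decidable (D_cdr_numbering_iterator length insertion_scheme) := by unfold D_cdr_numbering_iterator; infer_instance

def Spec_cdr_numbering_iterator (length : Int) (insertion_scheme : String) (out : List Int) : Prop := ¬ D_cdr_numbering_iterator length insertion_scheme → out = cdr_numbering_iterator_alt length insertion_scheme
instance (length : Int) (insertion_scheme : String) (out : List Int) : Decidable (Spec_cdr_numbering_iterator length insertion_scheme out) := by unfold Spec_cdr_numbering_iterator; infer_instance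

def pvDiffWitness_cdr_numbering_iterator : Int × String := (-1, "chothia")
def pvDiffWitnessOut_cdr_numbering_iterator : (List Int) × (List Int) := ([-1], [])

-- ===== CLAIM (what is proved, stated in full; the proofs are below) =====
def Claim_unchanged_cdr_numbering_iterator : Prop := ∀ (length : Int) (insertion_scheme : String), Dom_cdr_numbering_iterator length insertion_scheme → Pre_cdr_numbering_iterator length insertion_scheme → Spec_cdr_numbering_iterator length insertion_scheme (cdr_numbering_iterator length insertion_scheme)
def Claim_changed_cdr_numbering_iterator : Prop := Dom_cdr_numbering_iterator (pvDiffWitness_cdr_numbering_iterator.1) (pvDiffWitness_cdr_numbering_iterator.2) ∧ Pre_cdr_numbering_iterator (pvDiffWitness_cdr_numbering_iterator.1) (pvDiffWitness_cdr_numbering_iterator.2) ∧ D_cdr_numbering_iterator (pvDiffWitness_cdr_numbering_iterator.1) (pvDiffWitness_cdr_numbering_iterator.2) ∧ cdr_numbering_iterator (pvDiffWitness_cdr_numbering_iterator.1) (pvDiffWitness_cdr_numbering_iterator.2) = pvDiffWitnessOut_cdr_numbering_iterator.1 ∧ cdr_numbering_iterator_alt (pvDiffWitness_cdr_numbering_iterator.1)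 (pvDiffWitness_cdr_numbering_iterator.2) = pvDiffWitnessOut_cdr_numbering_iterator.2 ∧ pvDiffWitnessOut_cdr_numbering_iterator.1 ≠ pvDiffWitnessOut_cdr_numbering_iterator.2
def Claim_exact_cdr_numbering_iterator : Prop := ∀ (length : Int) (insertion_scheme : String), Dom_cdr_numbering_iterator length insertion_scheme → Pre_cdr_numbering_iterator length insertion_scheme → D_cdr_numbering_iterator length insertion_scheme → cdr_numbering_iterator length insertion_scheme ≠ cdr_numbering_iterator_alt length insertion_scheme

-- ===== LEMMAS AND PROOFS =====

lemma pv_pyRange_add (a : Int) (t : Nat) :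
    PySem.List.pyRange a (a + (t : Int)) = (List.range t).map (fun k : Nat => a + (k : Int)) := by
  simp only [PySem.List.pyRange]
  norm_num
  rcases Nat.eq_zero_or_pos t with ht | ht
  · subst ht; simp
  · rw [if_pos (by omega)]
lemma pv_pyRange_zero_toNat (x : Int) :
    PySem.List.pyRange 0 x = (List.range x.toNat).map (fun k : Nat => (k : Int)) := by
  by_cases h : 0 ≤ x
  · rw [← Int.toNat_of_nonneg h, PySem.List.pyRange_zero_natCast]
    simp [max_eq_left h]
  · rw [show x.toNat = 0 by omega]
    simp only [PySem.List.pyRange]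
    norm_num
    omega
lemma pv_pyRange_nil {a b : Int} (h : b ≤ a) : PySem.List.pyRange a b = [] := by
  simp only [PySem.List.pyRange]
  norm_num
  omega
lemma pv_pyRange_down (n : Nat) :
    PySem.List.pyRange ((n : Int) - 1) (-1) (-1)
      = ((List.range n).map (fun k : Nat => (k : Int))).reverse := by
  simp only [PySem.List.pyRange]
  norm_num
  rcases Nat.eq_zero_or_pos n with hn | hn
  · subst hn; simp
  · rw [if_pos hn]
    apply List.ext_getElem (by simp)
    intro i h1 h2
    simp at h1 ⊢
    omega
lemma pv_rev_loop (l : List Int) :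
    (PySem.List.pyRange ((l.length : Int) - 1) (-1) (-1)).foldl
      (fun acc j => acc ++ [PySem.List.pyGetD l j 0]) [] = l.reverse := by
  rw [pv_pyRange_down, PySem.List.foldl_append_singleton_eq_map, List.map_reverse, List.map_map]
  simp only [List.nil_append]
  congr 1
  apply List.ext_getElem (by simp)
  intro i h1 h2
  simp only [List.length_map, List.length_range] at h1
  simp only [List.getElem_map, List.getElem_range, Function.comp_apply]
  rw [PySem.List.pyGetD_eq_getElem l 0 (by positivity) (by exact_mod_cast h1)]
  simp
lemma pv_loop_char (yf af : Int → Int) (n : Nat) :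
    (PySem.List.pyRange 0 (n : Int)).foldl
      (fun (st : Int × List Int × List Int) _ =>
        if st.1 ≥ 0 then (-(st.1 + 1), st.2.1 ++ [yf st.1], st.2.2)
        else (-st.1, st.2.1, st.2.2 ++ [af st.1])) (0, [], [])
    = ((if n % 2 = 0 then ((n / 2 : Nat) : Int) else -(((n / 2 : Nat) : Int) + 1)),
       (List.range ((n + 1) / 2)).map (fun k : Nat => yf (k : Int)),
       (List.range (n / 2)).map (fun k : Nat => af (-((k : Int) + 1)))) := by
  induction n with
  | zero => simp [PySem.List.pyRange]
  | succ m ih =>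
    rw [show ((m + 1 : Nat) : Int) = (m : Int) + 1 by push_cast; ring,
        PySem.List.pyRange_one_succ_right (by positivity), List.foldl_append, ih]
    simp only [List.foldl_cons, List.foldl_nil]
    by_cases hm : m % 2 = 0
    · rw [if_pos hm, if_pos (by positivity), if_neg (by omega)]
      refine Prod.ext ?_ (Prod.ext ?_ ?_)
      · simp only []
        rw [show (m + 1) / 2 = m / 2 by omega]
      · simp only []
        rw [show (m + 1 + 1) / 2 = m / 2 + 1 by omega, show (m + 1) / 2 = m / 2 by omega,
            List.range_succ, List.map_append]
        simp
      · simp only []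
        rw [show (m + 1) / 2 = m / 2 by omega]
    · rw [if_neg hm, if_neg (by omega), if_pos (by omega)]
      refine Prod.ext ?_ (Prod.ext ?_ ?_)
      · simp only []
        rw [show (m + 1) / 2 = m / 2 + 1 by omega]
        push_cast; ring
      · simp only []
        rw [show (m + 1 + 1) / 2 = (m + 1) / 2 by omega]
      · simp only []
        rw [show (m + 1) / 2 = m / 2 + 1 by omega, List.range_succ, List.map_append]
        simp

lemma pv_anchor_eq (length : Int) :
    cdr_numbering_iterator length "anchor" = cdr_numbering_iterator_alt length "anchor" := by
  simp only [cdr_numbering_iterator, cdr_numbering_iterator_alt]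
  simp only [true_or, if_true]
  by_cases h0 : 0 ≤ length
  · rw [← Int.toNat_of_nonneg h0]
    have hl := pv_loop_char (fun i => i) (fun i => i) length.toNat
    simp only [] at hl
    rw [hl, pv_rev_loop]
    have e1 : PySem.Int.floordiv ((length.toNat : Int) + 1) 2 = (((length.toNat + 1) / 2 : Nat) : Int) := by
      rw [show ((length.toNat : Int) + 1) = ((length.toNat + 1 : Nat) : Int) by push_cast; ring]
      exact_mod_cast PySem.Int.floordiv_natCast (length.toNat + 1) 2
    have e2 : PySem.Int.floordiv ((length.toNat : Int)) 2 = ((length.toNat / 2 : Nat) : Int) :=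
      PySem.Int.floordiv_natCast length.toNat 2
    have e3 : PySem.List.pyRange (-((length.toNat / 2 : Nat) : Int)) 0
        = (List.range (length.toNat / 2)).map
            (fun k : Nat => -((length.toNat / 2 : Nat) : Int) + (k : Int)) := by
      have h := pv_pyRange_add (-((length.toNat / 2 : Nat) : Int)) (length.toNat / 2)
      rw [show (-((length.toNat / 2 : Nat) : Int) + ((length.toNat / 2 : Nat) : Int)) = 0 by ring] at h
      exact h
    rw [e1, e2, e3, pv_pyRange_zero_toNat, Int.toNat_natCast]
    congr 1
    apply List.ext_getElem (by simp)
    intro i h1 h2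
    simp at h1 ⊢
    omega
  · have hne : length ≤ 0 := by omega
    rw [pv_pyRange_nil hne]
    simp only [List.foldl_nil]
    rw [pv_rev_loop]
    have hf1 : PySem.Int.floordiv (length + 1) 2 ≤ 0 := by
      by_contra hc
      have := (PySem.Int.le_floordiv_iff_mul_le (a := length + 1) (q := 1) (b := 2) (by norm_num)).mp (by omega)
      omega
    have hf2 : PySem.Int.floordiv length 2 ≤ 0 := by
      by_contra hc
      have := (PySem.Int.le_floordiv_iff_mul_le (a := length) (q := 1) (b := 2) (by norm_num)).mp (by omega)
      omega
    rw [pv_pyRange_nil hf1, pv_pyRange_nil (by omega : (0:Int) ≤ -PySem.Int.floordiv length 2)]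
    simp

lemma pv_chothia_eq (length : Int) (h : length ≠ -1) :
    cdr_numbering_iterator length "chothia" = cdr_numbering_iterator_alt length "chothia" := by
  by_cases hl1 : length = 1
  · subst hl1; decide
  by_cases hl0 : length = 0
  · subst hl0; decide
  simp only [cdr_numbering_iterator, cdr_numbering_iterator_alt]
  simp only [or_true, if_true]
  rw [if_neg (by decide : ¬("chothia":String) = "anchor"),
      if_neg (by decide : ¬("chothia":String) = "anchor")]
  -- the loop over range(length-9)
  have ht9 : PySem.List.pyRange 0 (length - 9) = PySem.List.pyRange 0 (((length - 9).toNat : Nat) : Int) := by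
    rw [pv_pyRange_zero_toNat, pv_pyRange_zero_toNat, Int.toNat_natCast]
  rw [ht9]
  have hloop := pv_loop_char (fun i => i + 7) (fun i => i - 2) (length - 9).toNat
  simp only [] at hloop
  rw [hloop, pv_rev_loop]
  -- head
  have hh : PySem.List.slice (PySem.List.pyRange 0 7) none (some (max 0 (length - 2)))
      = PySem.List.pyRange 0 (min 7 (max 0 (length - 2))) := by
    rw [PySem.List.slice_to _ (le_max_left 0 (length - 2)), pv_pyRange_zero_toNat,
        pv_pyRange_zero_toNat, ← List.map_take, List.take_range]
    congr 2
    omega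
  rw [hh]
  -- middle
  have hmax : max 0 (length - 9) = (((length - 9).toNat : Nat) : Int) := by omega
  have hfd : PySem.Int.floordiv (((length - 9).toNat : Int) + 1) 2 = ((((length - 9).toNat + 1) / 2 : Nat) : Int) := by
    exact_mod_cast PySem.Int.floordiv_natCast ((length - 9).toNat + 1) 2
  have hfd2 : PySem.Int.floordiv (((length - 9).toNat : Int)) 2 = (((length - 9).toNat / 2 : Nat) : Int) := by
    exact_mod_cast PySem.Int.floordiv_natCast ((length - 9).toNat) 2
  have hm : (List.range (((length - 9).toNat + 1) / 2)).map (fun k : Nat => (k : Int) + 7)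
      = PySem.List.pyRange 7 (7 + PySem.Int.floordiv (max 0 (length - 9) + 1) 2) := by
    rw [hmax, hfd, pv_pyRange_add]
    apply List.ext_getElem (by simp)
    intro i h1 h2
    simp
    omega
  rw [hm]
  -- back buffer, reversed
  have hb : ((List.range ((length - 9).toNat / 2)).map (fun k : Nat => -((k : Int) + 1) - 2)).reverse
      = PySem.List.pyRange (-(PySem.Int.floordiv (max 0 (length - 9)) 2 + 2)) (-2) := by
    rw [hmax, hfd2]
    have hp := pv_pyRange_add (-((((length - 9).toNat / 2 : Nat) : Int) + 2)) ((length - 9).toNat / 2)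
    rw [show (-((((length - 9).toNat / 2 : Nat) : Int) + 2) + (((length - 9).toNat / 2 : Nat) : Int)) = -2 by ring] at hp
    rw [hp]
    apply List.ext_getElem (by simp)
    intro i h1 h2
    simp at h1 ⊢
    omega
  rw [hb]
  -- tail [-1,-2][:length][::-1]
  by_cases hneg : length < 0
  · have hle : length ≤ -2 := by omega
    have hsl : PySem.List.slice ([-1, -2] : List Int) none (some length) = [] := by
      simp [PySem.List.slice, PySem.List.clampIdx]
      split_ifs <;> omega
    rw [hsl, if_neg (by omega : ¬(2:Int) ≤ length), if_neg (by omega : ¬(1:Int) ≤ length)]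
    simp [List.append_assoc]
    decide
  · have h2 : 2 ≤ length := by omega
    have hsl : PySem.List.slice ([-1, -2] : List Int) none (some length) = [-1, -2] := by
      rw [PySem.List.slice_to _ (by omega), List.take_of_length_le (by simp; omega)]
    rw [hsl, if_pos (by omega : (2:Int) ≤ length), if_pos (by omega : (1:Int) ≤ length)]
    simp [List.append_assoc]
    decide

-- ===== VERDICT (by name: the statement is the Claim_ definition above) =====
theorem cdr_numbering_iterator_spec : Claim_unchanged_cdr_numbering_iterator := by
  intro length scheme _ hpre
  intro hnd
  rcases hpre with h | h <;> subst h
  · exact pv_anchor_eq length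
  · exact pv_chothia_eq length (fun hl => hnd ⟨hl, rfl⟩)

theorem cdr_numbering_iterator_changed : Claim_changed_cdr_numbering_iterator := by
  unfold Claim_changed_cdr_numbering_iterator; decide

theorem cdr_numbering_iterator_tight : Claim_exact_cdr_numbering_iterator := by
  intro length scheme _ _ hd
  obtain ⟨h1, h2⟩ := hd
  subst h1; subst h2; decide
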